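-- pv_equiv track=rewrite | github.com/ghostiaa/fivem-discord-bot | bot.py | parse_identifiers
-- ===== SOURCE A (Python) =====
-- def parse_identifiers(identifiers):
--     """Steam (hex -> 64) ve Discord ID'yi ayrıştırır."""
--     steam = None
--     discord_id = None
--
--     for ident in identifiers:
--         if ident.startswith("steam:"):
--             try:
--                 hex_id = ident.split(":", 1)[1]
--                 steam = str(int(hex_id, 16))
--             except Exception:
--                 steam = ident.split(":", 1)[1]
--         if ident.startswith("discord:"):
--             discord_id = ident.split(":", 1)[1]
--     return steam, discord_id
-- ===== SOURCE B (Python) =====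
-- def parse_identifiers(identifiers):
--     """Steam (hex -> 64) ve Discord ID'yi ayrıştırır."""
--     d = dict(s.split(":", 1) for s in identifiers if ":" in s)
--     discord_id = d.get("discord")
--     steam = d.get("steam")
--     if steam is not None:
--         try:
--             steam = str(int(steam, 16))
--         except Exception:
--             pass
--     return steam, discord_id
-- ===== Notes on version B (the rewrite author's own statement) =====
-- stated objective: simpler
-- what changed: Replaces the per-element prefix-test scan with building one prefix-to-value dict (last occurrence wins) and then extracting the 'discord' and 'steam' entries, converting the steam hex once at the end.
import Mathlib
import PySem

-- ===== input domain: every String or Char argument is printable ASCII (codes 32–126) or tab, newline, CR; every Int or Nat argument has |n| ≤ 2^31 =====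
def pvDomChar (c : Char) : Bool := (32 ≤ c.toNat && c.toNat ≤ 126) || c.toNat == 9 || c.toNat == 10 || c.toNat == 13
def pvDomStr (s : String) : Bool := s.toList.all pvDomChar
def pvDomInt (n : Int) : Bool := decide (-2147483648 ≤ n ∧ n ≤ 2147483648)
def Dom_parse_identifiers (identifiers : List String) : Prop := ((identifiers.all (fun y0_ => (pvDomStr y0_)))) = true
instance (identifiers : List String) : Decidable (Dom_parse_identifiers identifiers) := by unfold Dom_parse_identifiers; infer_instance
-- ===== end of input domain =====

-- B replaces A's per-element prefix-test scan by building one prefix→value dict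
-- (last occurrence wins) and then extracting the "discord" and "steam" entries: simpler, not faster.

-- ===== PORT A =====
def parse_identifiers (identifiers : List String) : Option String × Option String :=
  identifiers.foldl
    (fun acc ident =>
      let steam : Option String :=
        if PySem.Str.startswith ident "steam:" then
          -- try: hex_id = ident.split(":",1)[1]; steam = str(int(hex_id,16)); except: steam = ident.split(":",1)[1]
          let hex_id : String := (PySem.List.pyGet? ((PySem.Str.splitMax? ident ":" 1).getD []) 1).getD ""
          match PySem.Int.ofStrBase? hex_id 16 with
          | some n => some (PySem.Int.toStr n)
          | none => some hex_id
        else acc.1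
      let discord_id : Option String :=
        if PySem.Str.startswith ident "discord:" then
          some ((PySem.List.pyGet? ((PySem.Str.splitMax? ident ":" 1).getD []) 1).getD "")
        else acc.2
      (steam, discord_id))
    (none, none)

-- ===== PORT B =====
def parse_identifiers_alt (identifiers : List String) : Option String × Option String :=
  let d : PySem.Dict String String :=
    identifiers.foldl
      (fun d s =>
        if PySem.Str.isIn ":" s then
          let parts := (PySem.Str.splitMax? s ":" 1).getD []
          d.insert ((PySem.List.pyGet? parts 0).getD "") ((PySem.List.pyGet? parts 1).getD "")
        else d)
      PySem.Dict.empty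
  let discord_id := d.get? "discord"
  let steam : Option String :=
    match d.get? "steam" with
    | some v =>
      match PySem.Int.ofStrBase? v 16 with
      | some n => some (PySem.Int.toStr n)
      | none => some v
    | none => none
  (steam, discord_id)

-- ===== PRECONDITION & SPEC =====
def Spec_parse_identifiers (identifiers : List String) (out : Option String × Option String) : Prop := out = parse_identifiers_alt identifiers
instance (identifiers : List String) (out : Option String × Option String) : Decidable (Spec_parse_identifiers identifiers out) := by unfold Spec_parse_identifiers; infer_instance

-- ===== CLAIM (what is proved, stated in full; the proofs are below) =====
def Claim_equal_parse_identifiers : Prop := ∀ (identifiers : List String), Dom_parse_identifiers identifiers → Spec_parse_identifiers identifiers (parse_identifiers identifiers)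

-- ===== LEMMAS AND PROOFS =====

-- A's and B's fold steps, named so the invariant can speak about them.
def pvStepA (acc : Option String × Option String) (ident : String) : Option String × Option String :=
  let steam : Option String :=
    if PySem.Str.startswith ident "steam:" then
      let hex_id : String := (PySem.List.pyGet? ((PySem.Str.splitMax? ident ":" 1).getD []) 1).getD ""
      match PySem.Int.ofStrBase? hex_id 16 with
      | some n => some (PySem.Int.toStr n)
      | none => some hex_id
    else acc.1
  let discord_id : Option String :=
    if PySem.Str.startswith ident "discord:" then
      some ((PySem.List.pyGet? ((PySem.Str.splitMax? ident ":" 1).getD []) 1).getD "")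
    else acc.2
  (steam, discord_id)

def pvStepB (d : PySem.Dict String String) (s : String) : PySem.Dict String String :=
  if PySem.Str.isIn ":" s then
    let parts := (PySem.Str.splitMax? s ":" 1).getD []
    d.insert ((PySem.List.pyGet? parts 0).getD "") ((PySem.List.pyGet? parts 1).getD "")
  else d

def pvConv (v : String) : String :=
  match PySem.Int.ofStrBase? v 16 with
  | some n => PySem.Int.toStr n
  | none => v

lemma pv_pyGet2_0 (a b : String) : (PySem.List.pyGet? [a, b] 0).getD "" = a := rfl
lemma pv_pyGet2_1 (a b : String) : (PySem.List.pyGet? [a, b] 1).getD "" = b := rfl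

lemma pvA_eq (identifiers : List String) :
    parse_identifiers identifiers = identifiers.foldl pvStepA (none, none) := rfl

lemma pvB_eq (identifiers : List String) :
    parse_identifiers_alt identifiers =
      (((identifiers.foldl pvStepB PySem.Dict.empty).get? "steam").map pvConv,
        (identifiers.foldl pvStepB PySem.Dict.empty).get? "discord") := by
  show ((match (identifiers.foldl pvStepB (PySem.Dict.empty : PySem.Dict String String)).get? "steam" with
      | some v =>
        match PySem.Int.ofStrBase? v 16 with
        | some n => some (PySem.Int.toStr n)
        | none => some v
      | none => none),
    (identifiers.foldl pvStepB (PySem.Dict.empty : PySem.Dict String String)).get? "discord") = _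
  cases h : (identifiers.foldl pvStepB (PySem.Dict.empty : PySem.Dict String String)).get? "steam" with
  | none => rfl
  | some v =>
    cases hh : PySem.Int.ofStrBase? v 16 <;> simp [pvConv, hh]

-- ---- string facts ----

lemma pv_first_colon {cs : List Char} (h : ':' ∈ cs) :
    ∃ pre rest, cs = pre ++ ':' :: rest ∧ ':' ∉ pre := by
  induction cs with
  | nil => cases h
  | cons c cs ih =>
    by_cases hc : c = ':'
    · exact ⟨[], cs, by simp [hc], by simp⟩
    · have h' : ':' ∈ cs := by
        rcases List.mem_cons.mp h with h | h
        · exact absurd h.symm hc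
        · exact h
      obtain ⟨pre, rest, heq, hpre⟩ := ih h'
      refine ⟨c :: pre, rest, by simp [heq], ?_⟩
      intro hmem
      rcases List.mem_cons.mp hmem with h9 | h9
      · exact hc h9.symm
      · exact hpre h9

lemma pv_prefix_iff {p pre rest : List Char} (hp : ':' ∉ p) (hpre : ':' ∉ pre) :
    ((p ++ [':']) <+: (pre ++ ':' :: rest)) ↔ p = pre := by
  induction p generalizing pre with
  | nil =>
    cases pre with
    | nil => simp
    | cons b pre' =>
      have hb : ':' ≠ b := fun h => hpre (by simp [← h])
      simp [List.cons_prefix_cons, hb]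
  | cons a p' ih =>
    have hp' : ':' ∉ p' := fun h => hp (List.mem_cons_of_mem _ h)
    have ha : a ≠ ':' := fun h => hp (by simp [h])
    cases pre with
    | nil => simp [List.cons_prefix_cons, ha]
    | cons b pre' =>
      have hpre' : ':' ∉ pre' := fun h => hpre (List.mem_cons_of_mem _ h)
      simp [List.cons_prefix_cons, ih hp' hpre']

lemma pv_startswith_of_decomp {s : String} {pre rest : List Char} {p : String}
    (hs : s.toList = pre ++ ':' :: rest) (hpre : ':' ∉ pre) (hp : ':' ∉ p.toList) :
    PySem.Str.startswith s (String.ofList (p.toList ++ [':'])) = true ↔ p.toList = pre := by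
  rw [PySem.Str.startswith_eq, PySem.Chars.startswith_iff]
  simp only [String.toList_ofList, hs]
  exact pv_prefix_iff hp hpre

lemma pv_startswith_false_of_no_colon {s p : String}
    (hs : ':' ∉ s.toList) (hp : ':' ∈ p.toList) :
    PySem.Str.startswith s p = false := by
  by_contra h
  have h' : PySem.Str.startswith s p = true := by
    cases hb : PySem.Str.startswith s p
    · exact absurd hb h
    · rfl
  rw [PySem.Str.startswith_eq, PySem.Chars.startswith_iff] at h'
  exact hs (h'.subset hp)

lemma pv_isIn_true {s : String} (h : ':' ∈ s.toList) : PySem.Str.isIn ":" s = true := by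
  rw [PySem.Str.isIn_iff_infix]
  obtain ⟨pre, rest, heq, _⟩ := pv_first_colon h
  exact ⟨pre, rest, by simp [heq]⟩

lemma pv_isIn_false {s : String} (h : ':' ∉ s.toList) : PySem.Str.isIn ":" s = false := by
  by_contra hb
  have h' : PySem.Str.isIn ":" s = true := by
    cases hc : PySem.Str.isIn ":" s
    · exact absurd hc hb
    · rfl
  rw [PySem.Str.isIn_iff_infix] at h'
  exact h (h'.subset (by simp))

-- splitOnMax.go with maxsplit exhausted
lemma pv_go_zero (fuel : Nat) (l cur : List Char) (acc : List (List Char)) :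
    PySem.Chars.splitOnMax.go [':'] fuel 0 l cur acc = ((cur.reverse ++ l) :: acc).reverse := by
  cases fuel with
  | zero => simp [PySem.Chars.splitOnMax.go]
  | succ fuel => cases l <;> simp [PySem.Chars.splitOnMax.go]

lemma pv_go_colon (fuel : Nat) (pre rest cur : List Char) (acc : List (List Char))
    (hfuel : pre.length < fuel) (hpre : ':' ∉ pre) :
    PySem.Chars.splitOnMax.go [':'] fuel 1 (pre ++ ':' :: rest) cur acc =
      acc.reverse ++ [cur.reverse ++ pre, rest] := by
  induction fuel generalizing pre cur with
  | zero => omega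
  | succ fuel ih =>
    cases pre with
    | nil =>
      have hpf : [':'].isPrefixOf (':' :: rest) = true := by simp [List.isPrefixOf]
      simp only [List.nil_append, PySem.Chars.splitOnMax.go, hpf, if_true]
      simp [pv_go_zero]
    | cons c pre' =>
      have hc : ¬ (c = ':') := fun h => hpre (by simp [h])
      have hpre' : ':' ∉ pre' := fun h => hpre (List.mem_cons_of_mem _ h)
      have hpf : [':'].isPrefixOf (c :: (pre' ++ ':' :: rest)) = false := by
        simp [List.isPrefixOf]
        intro h; exact absurd h.symm hc
      simp only [List.cons_append, PySem.Chars.splitOnMax.go, hpf, Bool.false_eq_true, if_false]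
      rw [ih pre' (c :: cur) (by simp at hfuel ⊢; omega) hpre']
      simp

lemma pv_split_colon {s : String} {pre rest : List Char}
    (hs : s.toList = pre ++ ':' :: rest) (hpre : ':' ∉ pre) :
    (PySem.Str.splitMax? s ":" 1).getD [] = [String.ofList pre, String.ofList rest] := by
  have hsep : (":".toList) = [':'] := rfl
  have hgo : PySem.Chars.splitOnMax (pre ++ ':' :: rest) [':'] 1 = [pre, rest] := by
    unfold PySem.Chars.splitOnMax
    rw [if_neg (by omega)]
    have h1 : (1 : Int).toNat = 1 := rfl
    rw [h1, pv_go_colon ((pre ++ ':' :: rest).length + 1) pre rest [] [] (by simp only [List.length_append, List.length_cons]; omega) hpre]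
    simp
  simp [PySem.Str.splitMax?, PySem.Chars.splitMax?, hsep, hs, hgo]

-- main invariant: folding A's step from the state read off a dict d
-- equals the state read off the result of folding B's step from d
lemma pv_invariant (l : List String) (d : PySem.Dict String String) :
    l.foldl pvStepA (((d.get? "steam").map pvConv), d.get? "discord") =
      (((l.foldl pvStepB d).get? "steam").map pvConv, (l.foldl pvStepB d).get? "discord") := by
  induction l generalizing d with
  | nil => simp
  | cons s l ih =>
    by_cases hc : ':' ∈ s.toList
    · obtain ⟨pre, rest, heq, hpre⟩ := pv_first_colon hc
      have hsplit := pv_split_colon heq hpre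
      have hswS := pv_startswith_of_decomp (p := "steam") heq hpre (by decide)
      have hswD := pv_startswith_of_decomp (p := "discord") heq hpre (by decide)
      have hofS : ("steam:" : String) = String.ofList ("steam".toList ++ [':']) := rfl
      have hofD : ("discord:" : String) = String.ofList ("discord".toList ++ [':']) := rfl
      have hIn := pv_isIn_true hc
      by_cases hS : pre = "steam".toList
      · have hkey : String.ofList pre = "steam" := by rw [hS]; rfl
        have hstep : pvStepB d s = d.insert "steam" (String.ofList rest) := by
          simp only [pvStepB, hIn, hsplit, pv_pyGet2_0, pv_pyGet2_1, hkey, if_true]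
        have hsw : PySem.Str.startswith s "steam:" = true := by
          rw [hofS, hswS]; exact hS.symm
        have hswd : PySem.Str.startswith s "discord:" = false := by
          rw [hofD]
          cases hb : PySem.Str.startswith s (String.ofList ("discord".toList ++ [':']))
          · rfl
          · exact absurd (hS ▸ hswD.mp hb) (by decide)
        have hA : pvStepA ((d.get? "steam").map pvConv, d.get? "discord") s =
            (((d.insert "steam" (String.ofList rest)).get? "steam").map pvConv,
              (d.insert "steam" (String.ofList rest)).get? "discord") := by
          simp only [pvStepA, hsw, hswd, hsplit, pv_pyGet2_1, if_true, Bool.false_eq_true, if_false,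
            PySem.Dict.get?_insert_self,
            PySem.Dict.get?_insert_of_ne d (String.ofList rest)
              (show ("discord" : String) ≠ "steam" from by decide)]
          cases hh : PySem.Int.ofStrBase? (String.ofList rest) 16 <;> simp [pvConv, hh]
        rw [List.foldl_cons, List.foldl_cons, hstep, hA]
        exact ih (d.insert "steam" (String.ofList rest))
      · by_cases hD : pre = "discord".toList
        · have hkey : String.ofList pre = "discord" := by rw [hD]; rfl
          have hstep : pvStepB d s = d.insert "discord" (String.ofList rest) := by
            simp only [pvStepB, hIn, hsplit, pv_pyGet2_0, pv_pyGet2_1, hkey, if_true]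
          have hsw : PySem.Str.startswith s "discord:" = true := by
            rw [hofD, hswD]; exact hD.symm
          have hsws : PySem.Str.startswith s "steam:" = false := by
            rw [hofS]
            cases hb : PySem.Str.startswith s (String.ofList ("steam".toList ++ [':']))
            · rfl
            · exact absurd (hD ▸ hswS.mp hb) (by decide)
          have hA : pvStepA ((d.get? "steam").map pvConv, d.get? "discord") s =
              (((d.insert "discord" (String.ofList rest)).get? "steam").map pvConv,
                (d.insert "discord" (String.ofList rest)).get? "discord") := by
            simp only [pvStepA, hsw, hsws, hsplit, pv_pyGet2_1, if_true, Bool.false_eq_true, if_false,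
              PySem.Dict.get?_insert_self,
              PySem.Dict.get?_insert_of_ne d (String.ofList rest)
                (show ("steam" : String) ≠ "discord" from by decide)]
          rw [List.foldl_cons, List.foldl_cons, hstep, hA]
          exact ih (d.insert "discord" (String.ofList rest))
        · have hkeyS : ("steam" : String) ≠ String.ofList pre := by
            intro h; exact hS (by rw [h]; simp)
          have hkeyD : ("discord" : String) ≠ String.ofList pre := by
            intro h; exact hD (by rw [h]; simp)
          have hstep : pvStepB d s = d.insert (String.ofList pre) (String.ofList rest) := by
            simp only [pvStepB, hIn, hsplit, pv_pyGet2_0, pv_pyGet2_1, if_true]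
          have hsws : PySem.Str.startswith s "steam:" = false := by
            rw [hofS]
            cases hb : PySem.Str.startswith s (String.ofList ("steam".toList ++ [':']))
            · rfl
            · exact absurd (hswS.mp hb).symm hS
          have hswd : PySem.Str.startswith s "discord:" = false := by
            rw [hofD]
            cases hb : PySem.Str.startswith s (String.ofList ("discord".toList ++ [':']))
            · rfl
            · exact absurd (hswD.mp hb).symm hD
          have hA : pvStepA ((d.get? "steam").map pvConv, d.get? "discord") s =
              (((d.insert (String.ofList pre) (String.ofList rest)).get? "steam").map pvConv,
                (d.insert (String.ofList pre) (String.ofList rest)).get? "discord") := by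
            simp only [pvStepA, hsws, hswd, Bool.false_eq_true, if_false,
              PySem.Dict.get?_insert_of_ne d (String.ofList rest) hkeyS,
              PySem.Dict.get?_insert_of_ne d (String.ofList rest) hkeyD]
          rw [List.foldl_cons, List.foldl_cons, hstep, hA]
          exact ih (d.insert (String.ofList pre) (String.ofList rest))
    · have h1 := pv_startswith_false_of_no_colon (p := "steam:") hc (by decide)
      have h2 := pv_startswith_false_of_no_colon (p := "discord:") hc (by decide)
      have hIn := pv_isIn_false hc
      have hA : pvStepA ((d.get? "steam").map pvConv, d.get? "discord") s =
          ((d.get? "steam").map pvConv, d.get? "discord") := by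
        simp only [pvStepA, h1, h2, Bool.false_eq_true, if_false]
      have hB : pvStepB d s = d := by
        simp only [pvStepB, hIn, Bool.false_eq_true, if_false]
      rw [List.foldl_cons, List.foldl_cons, hA, hB]
      exact ih d

-- ===== VERDICT (by name: the statement is the Claim_ definition above) =====
theorem parse_identifiers_spec : Claim_equal_parse_identifiers := by
  intro identifiers _
  show parse_identifiers identifiers = parse_identifiers_alt identifiers
  rw [pvA_eq, pvB_eq]
  have h := pv_invariant identifiers PySem.Dict.empty
  simpa using h
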